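-- pv_equiv track=rewrite | github.com/windwindwa/tools | findReviewer/useDerison/filterHandler.py | filter_affiliation_by_school
-- ===== SOURCE A (Python) =====
-- def filter_affiliation_by_school(data, school_dict):
--     """
--     筛选 read_excel_file 结果中 Affiliation 包含任意学校全称或简称的记录。
--
--     :param data: 从 read_excel_file 返回的字典列表
--     :param school_dict: 从 read_school_file 返回的字典，包含全称和简称列表
--     :return: (filtered_results, excluded_results)
--         - filtered_results: 满足条件的记录列表
--         - excluded_results: 不满足条件的记录列表
--     """
--     filtered_results = []
--     excluded_results = []
--
--     # 提取学校全称和简称列表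
--     full_names = set(school_dict.get("full_name", []))
--     short_names = set(school_dict.get("short_name", []))
--
--     # 遍历 data 进行筛选
--     for record in data:
--         affiliation = record.get("Affiliation", "")
--         if any(school in affiliation for school in full_names | short_names):
--             filtered_results.append(record)
--         else:
--             excluded_results.append(record)
--
--     return filtered_results, excluded_results
-- ===== SOURCE B (Python) =====
-- def filter_affiliation_by_school(data, school_dict):
--     # Alternative algorithm: build a first-character index of the school names once,
--     # then scan each affiliation position by position, trying only the patterns
--     # whose first character matches the character at that position.
--     patterns = school_dict.get("full_name", []) + school_dict.get("short_name", [])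
--     has_empty = "" in patterns
--     index = {}
--     for p in patterns:
--         if p:
--             index.setdefault(p[0], []).append(p)
--
--     filtered, excluded = [], []
--     for record in data:
--         aff = record.get("Affiliation", "")
--         hit = has_empty or any(
--             aff.startswith(p, i)
--             for i, c in enumerate(aff)
--             for p in index.get(c, [])
--         )
--         (filtered if hit else excluded).append(record)
--     return filtered, excluded
-- ===== Notes on version B (the rewrite author's own statement) =====
-- stated objective: alternative
-- what changed: B replaces A's per-pattern 'school in affiliation' substring scans over a set union with a first-character index (dict from first char to the patterns starting with it) built once, then scans each affiliation position by position, trying only the patterns whose first character matches the current character.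
import Mathlib
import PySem

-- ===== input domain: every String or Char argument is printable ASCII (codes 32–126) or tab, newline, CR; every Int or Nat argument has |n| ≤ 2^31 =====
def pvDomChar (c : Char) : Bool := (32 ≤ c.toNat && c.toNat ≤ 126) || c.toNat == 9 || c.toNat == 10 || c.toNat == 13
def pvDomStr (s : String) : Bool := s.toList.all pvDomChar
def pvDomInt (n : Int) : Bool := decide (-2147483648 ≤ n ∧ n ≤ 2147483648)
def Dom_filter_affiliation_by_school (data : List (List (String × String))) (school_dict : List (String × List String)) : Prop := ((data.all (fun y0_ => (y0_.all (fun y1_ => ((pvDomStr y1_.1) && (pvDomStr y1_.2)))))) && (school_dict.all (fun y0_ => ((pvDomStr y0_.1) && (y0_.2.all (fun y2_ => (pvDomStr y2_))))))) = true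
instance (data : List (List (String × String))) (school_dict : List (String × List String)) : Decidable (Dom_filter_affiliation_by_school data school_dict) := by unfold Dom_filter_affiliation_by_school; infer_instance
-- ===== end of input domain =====

-- B replaces A's per-pattern 'school in affiliation' scan with a first-character index of
-- the school names built once, scanning each affiliation position by position (objective: alternative).


-- ===== PORT A =====
def filter_affiliation_by_school (data : List (List (String × String))) (school_dict : List (String × List String)) : (List (List (String × String))) × (List (List (String × String))) :=
  let full_names : PySem.Set String := PySem.Set.ofList ((PySem.Dict.ofList school_dict).getD "full_name" [])
  let short_names : PySem.Set String := PySem.Set.ofList ((PySem.Dict.ofList school_dict).getD "short_name" [])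
  let res := data.foldl (fun (acc : List (List (String × String)) × List (List (String × String))) record =>
    let affiliation := (PySem.Dict.ofList record).getD "Affiliation" ""
    if (PySem.Set.union full_names short_names).any (fun school => PySem.Str.isIn school affiliation) then
      (acc.1 ++ [record], acc.2)
    else
      (acc.1, acc.2 ++ [record])) ([], [])
  res

-- ===== PORT B =====
-- index.setdefault(p[0], []).append(p): the key p[0] is a one-character string; ported
-- with the character itself as key (exact: one-character strings are equal iff their
-- characters are).
def pvIdxStep (idx : PySem.Dict Char (List String)) (p : String) : PySem.Dict Char (List String) :=
  match p.toList with
  | [] => idx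
  | c :: _ => idx.insert c (idx.getD c [] ++ [p])

-- aff.startswith(p, i) with 0 ≤ i < len(aff) (i comes from enumerate): exact as
-- 'p.toList.isPrefixOf (aff.toList.drop i)'.
def pvHitB (hasEmpty : Bool) (idx : PySem.Dict Char (List String)) (record : List (String × String)) : Bool :=
  let aff := (PySem.Dict.ofList record).getD "Affiliation" ""
  hasEmpty || (PySem.List.enumerate aff.toList).any (fun ic =>
    (idx.getD ic.2 []).any (fun p => p.toList.isPrefixOf (aff.toList.drop ic.1.toNat)))

def filter_affiliation_by_school_alt (data : List (List (String × String))) (school_dict : List (String × List String)) : (List (List (String × String))) × (List (List (String × String))) :=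
  let d := PySem.Dict.ofList school_dict
  let patterns := d.getD "full_name" [] ++ d.getD "short_name" []
  let hasEmpty := patterns.contains ""
  let idx := patterns.foldl pvIdxStep PySem.Dict.empty
  data.foldl (fun (acc : List (List (String × String)) × List (List (String × String))) record =>
    if pvHitB hasEmpty idx record then (acc.1 ++ [record], acc.2)
    else (acc.1, acc.2 ++ [record])) ([], [])

-- ===== PRECONDITION & SPEC =====
def Spec_filter_affiliation_by_school (data : List (List (String × String))) (school_dict : List (String × List String)) (out : (List (List (String × String))) × (List (List (String × String)))) : Prop := out = filter_affiliation_by_school_alt data school_dict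
instance (data : List (List (String × String))) (school_dict : List (String × List String)) (out : (List (List (String × String))) × (List (List (String × String)))) : Decidable (Spec_filter_affiliation_by_school data school_dict out) := by unfold Spec_filter_affiliation_by_school; infer_instance

-- ===== CLAIM (what is proved, stated in full; the proofs are below) =====
def Claim_equal_filter_affiliation_by_school : Prop := ∀ (data : List (List (String × String))) (school_dict : List (String × List String)), Dom_filter_affiliation_by_school data school_dict → Spec_filter_affiliation_by_school data school_dict (filter_affiliation_by_school data school_dict)

-- ===== LEMMAS AND PROOFS =====

-- any over the union of two sets = any over the concatenation of the underlying lists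
lemma pv_any_union (f s : List String) (p : String → Bool) :
    (PySem.Set.union (PySem.Set.ofList f) (PySem.Set.ofList s)).any p = (f ++ s).any p := by
  apply Bool.eq_iff_iff.mpr
  simp only [List.any_eq_true, PySem.Set.mem_union, PySem.Set.mem_ofList, List.mem_append]

-- the first-character index: bucket c holds exactly the patterns whose first char is c, in order
lemma pv_idx_getD (ps : List String) (idx : PySem.Dict Char (List String)) (c : Char) :
    (ps.foldl pvIdxStep idx).getD c [] =
      idx.getD c [] ++ ps.filter (fun p => p.toList.head? == some c) := by
  induction ps generalizing idx with
  | nil => simp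
  | cons p t ih =>
    simp only [List.foldl_cons, List.filter_cons]
    rw [ih]
    unfold pvIdxStep
    cases hp : p.toList with
    | nil => simp
    | cons c' rest =>
      by_cases hc : c = c'
      · subst hc
        simp
      · rw [PySem.Dict.getD_insert, if_neg hc]; simp [Ne.symm hc]

lemma pv_mem_idx (ps : List String) (c : Char) (p : String) :
    p ∈ (ps.foldl pvIdxStep PySem.Dict.empty).getD c [] ↔
      p ∈ ps ∧ p.toList.head? = some c := by
  rw [pv_idx_getD]
  simp [List.mem_filter]

-- prefix of a suffix is an infix
lemma pv_prefix_drop_infix {l₁ l₂ : List Char} {j : Nat} (h : l₁ <+: l₂.drop j) : l₁ <:+: l₂ :=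
  h.isInfix.trans (List.drop_suffix j l₂).isInfix

-- the indexed position scan decides the same predicate as 'any school in affiliation'
lemma pv_hit_eq (patterns : List String) (record : List (String × String)) :
    pvHitB (patterns.contains "") (patterns.foldl pvIdxStep PySem.Dict.empty) record
      = patterns.any (fun p => PySem.Str.isIn p ((PySem.Dict.ofList record).getD "Affiliation" "")) := by
  apply Bool.eq_iff_iff.mpr
  unfold pvHitB
  set aff := (PySem.Dict.ofList record).getD "Affiliation" "" with haff
  simp only [Bool.or_eq_true, List.any_eq_true, List.contains_eq_mem, decide_eq_true_eq]
  constructor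
  · rintro (hempty | ⟨ic, hic, p, hp, hpre⟩)
    · exact ⟨"", hempty, by simp⟩
    · obtain ⟨hmem, _⟩ := (pv_mem_idx patterns ic.2 p).mp hp
      refine ⟨p, hmem, ?_⟩
      rw [PySem.Str.isIn_iff_infix]
      exact pv_prefix_drop_infix (List.isPrefixOf_iff_prefix.mp hpre)
  · rintro ⟨p, hmem, hin⟩
    cases hp : p.toList with
    | nil =>
      left
      have : p = "" := by
        rw [← String.ofList_toList (s := p), hp]
      rwa [this] at hmem
    | cons c rest =>
      right
      rw [PySem.Str.isIn_iff_infix] at hin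
      have hin' : PySem.Chars.isIn p.toList aff.toList = true :=
        (PySem.Chars.isIn_iff_infix _ _).mpr hin
      obtain ⟨j, hjpre⟩ := (PySem.Chars.exists_prefix_drop_iff_isIn _ _).mpr hin'
      have hjlt : j < aff.toList.length := by
        by_contra hge
        have : aff.toList.drop j = [] := List.drop_eq_nil_of_le (Nat.le_of_not_lt hge)
        rw [this, hp] at hjpre
        exact absurd hjpre.length_le (by simp)
      refine ⟨((j : Int), aff.toList[j]), ?_, p, ?_, ?_⟩
      · rw [PySem.List.mem_enumerate_iff]
        exact ⟨j, hjlt, by simp⟩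
      · refine (pv_mem_idx patterns _ p).mpr ⟨hmem, ?_⟩
        obtain ⟨t, ht⟩ := hjpre
        rw [hp] at ht
        have hdj : aff.toList.drop j = c :: (rest ++ t) := by rw [← ht]; simp
        have h1 : aff.toList[j]? = some c := by rw [← List.head?_drop, hdj]; rfl
        have h2 : aff.toList[j]'hjlt = c := by
          simpa [List.getElem?_eq_getElem hjlt] using h1
        simp [hp, h2]
      · simp only [Int.toNat_natCast]
        exact List.isPrefixOf_iff_prefix.mpr hjpre

-- A's two-accumulator fold with any predicate
lemma pv_foldl_congr {α : Type} (p q : α → Bool) (hpq : ∀ x, p x = q x) (l : List α)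
    (a b : List α) :
    l.foldl (fun (acc : List α × List α) r =>
      if p r then (acc.1 ++ [r], acc.2) else (acc.1, acc.2 ++ [r])) (a, b)
    = l.foldl (fun (acc : List α × List α) r =>
      if q r then (acc.1 ++ [r], acc.2) else (acc.1, acc.2 ++ [r])) (a, b) := by
  induction l generalizing a b with
  | nil => rfl
  | cons x t ih => simp only [List.foldl_cons, hpq x]; split <;> exact ih _ _

-- ===== VERDICT (by name: the statement is the Claim_ definition above) =====
theorem filter_affiliation_by_school_spec : Claim_equal_filter_affiliation_by_school := by
  intro data school_dict _
  show _ = _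
  unfold filter_affiliation_by_school filter_affiliation_by_school_alt
  simp only []
  exact pv_foldl_congr _ _ (fun record => by
    rw [pv_any_union, ← pv_hit_eq]) data [] []
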